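-- pv_equiv track=rewrite | github.com/RecoRecoNi/Algorithm-Study | BOJ/골드바흐의 추측/sumin.py | find_partition
-- ===== SOURCE A (Python) =====
-- from typing import List
--
-- def find_partition(target: int, prime_number: List) -> List:
--     """
--     target: 찾아야 하는 골드바흐 파티션의 합이 되는 짝수
--     prime_number: n까지의 소수 배열
--     """
--     left, right = 0, len(prime_number)-1
--     diff = target # 현재까지 찾은 최소 차이
--     result = [0, 0] # 최소 차이를 가지는 골드바흐 파티션
--
--     # 투포인터
--     while left <= right:
--         cur_sum = prime_number[left] + prime_number[right]
--         if cur_sum == target: # 두 소수의 합이 target이 될 때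
--             if diff > prime_number[right] - prime_number[left]: # 최소 차이 업데이트
--                 diff = prime_number[right] - prime_number[left]
--                 result[0], result[1] = prime_number[left], prime_number[right]
--             left += 1
--         elif cur_sum < target: # 두 소수의 합이 target보다 작다면 left를 증가
--             left += 1
--         else: # 두 소수의 합이 target보다 크다면 right를 감소
--             right -= 1
--     return result
-- ===== SOURCE B (Python) =====
-- def find_partition(target, prime_number):
--     primes = set(prime_number)
--     best = None
--     for p in prime_number:
--         if p <= target - p and (target - p) in primes:
--             if best is None or p > best:
--                 best = p
--     return [0, 0] if best is None else [best, target - best]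
-- ===== Notes on version B (the rewrite author's own statement) =====
-- stated objective: idiomatic
-- what changed: Replaces the two-converging-pointers scan with a single pass over the list plus a hash-set membership test, keeping the largest p with p <= target-p and target-p in the set (the minimal-difference partition).
-- outside the precondition, e.g. on find_partition(10, [7, 3]): A returns [7, 3], B returns [3, 7]; on find_partition(0, [-3, 3]): A returns [0, 0], B returns [-3, 3]
import Mathlib
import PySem

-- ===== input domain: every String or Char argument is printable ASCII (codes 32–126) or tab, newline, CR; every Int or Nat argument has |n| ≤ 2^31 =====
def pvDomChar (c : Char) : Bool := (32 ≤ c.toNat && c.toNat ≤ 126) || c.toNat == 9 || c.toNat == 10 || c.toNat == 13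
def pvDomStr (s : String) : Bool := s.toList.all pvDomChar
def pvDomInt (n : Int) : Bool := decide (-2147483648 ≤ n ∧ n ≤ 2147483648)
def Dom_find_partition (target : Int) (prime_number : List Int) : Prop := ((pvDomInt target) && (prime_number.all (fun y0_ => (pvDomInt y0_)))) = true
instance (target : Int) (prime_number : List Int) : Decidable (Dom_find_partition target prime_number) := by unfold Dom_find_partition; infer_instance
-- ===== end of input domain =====

-- B replaces the two converging pointers by one pass with a set-membership test (idiomatic; same O(n) cost).

-- ===== PORT A =====
-- the while-loop of A; indexing via pyGet? (in range on every reached state, so the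
-- `| _, _ => result` arm is never taken — Python never raises here)
-- fuel = current window size (right+1-left); it only makes the recursion structural,
-- the loop still exits on its own `left ≤ right` test
def loopA (xs : List Int) (target : Int) (fuel : Nat) (left right diff : Int) (result : List Int) : List Int :=
  match fuel with
  | 0 => result
  | fuel + 1 =>
    if left ≤ right then
      match PySem.List.pyGet? xs left, PySem.List.pyGet? xs right with
      | some a, some b =>
        if a + b = target then
          if diff > b - a then loopA xs target fuel (left + 1) right (b - a) [a, b]
          else loopA xs target fuel (left + 1) right diff result
        else if a + b < target then loopA xs target fuel (left + 1) right diff result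
        else loopA xs target fuel left (right - 1) diff result
      | _, _ => result
    else result

def find_partition (target : Int) (prime_number : List Int) : List Int :=
  loopA prime_number target prime_number.length 0 ((prime_number.length : Int) - 1) target [0, 0]

-- ===== PORT B =====
def find_partition_alt (target : Int) (prime_number : List Int) : List Int :=
  let primes : PySem.Set Int := PySem.Set.ofList prime_number
  let best : Option Int := prime_number.foldl
    (fun best p =>
      if p ≤ target - p ∧ PySem.Set.contains primes (target - p) then
        match best with
        | none => some p
        | some b => if p > b then some p else some b
      else best) none
  match best with
  | none => [0, 0]
  | some b => [b, target - b]

-- ===== PRECONDITION & SPEC =====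
-- Pre_ admits every input without a pair summing to target (both programs return [0, 0] there,
-- whatever the list looks like); on inputs that do contain such a pair it requires the strictly
-- sorted positive prime array A's two-pointer assumes — unsorted/duplicate or non-positive lists
-- with a pair are excluded, since A's value there is an artefact of the pointer walk and of diff
-- being initialised to target.
-- strictly increasing, as a directly computable Bool
def strictSortedB : List Int → Bool
  | [] => true
  | [_] => true
  | a :: b :: t => a < b && strictSortedB (b :: t)

def Pre_find_partition (target : Int) (prime_number : List Int) : Prop :=
  (strictSortedB prime_number = true ∧ prime_number.all (fun x => decide (0 < x)) = true)
  ∨ (∀ p ∈ prime_number, ¬ (p ≤ target - p ∧ (target - p) ∈ prime_number))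
instance (target : Int) (prime_number : List Int) : Decidable (Pre_find_partition target prime_number) := by unfold Pre_find_partition; infer_instance

def pvWitness_find_partition : Int × List Int := (10, [2, 3, 5, 7])

def Spec_find_partition (target : Int) (prime_number : List Int) (out : List Int) : Prop := out = find_partition_alt target prime_number
instance (target : Int) (prime_number : List Int) (out : List Int) : Decidable (Spec_find_partition target prime_number out) := by unfold Spec_find_partition; infer_instance

-- ===== CLAIM (what is proved, stated in full; the proofs are below) =====
def Claim_equal_find_partition : Prop := ∀ (target : Int) (prime_number : List Int), Dom_find_partition target prime_number → Pre_find_partition target prime_number → Spec_find_partition target prime_number (find_partition target prime_number)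

-- ===== LEMMAS AND PROOFS =====

-- value p is the smaller member of a Goldbach pair inside the index window [l, r]
def PairV (xs : List Int) (target l r p : Int) : Prop :=
  ∃ (i j : Nat) (hi : i < xs.length) (hj : j < xs.length),
    l ≤ (i : Int) ∧ (j : Int) ≤ r ∧ i ≤ j ∧ xs[i] = p ∧ xs[i] + xs[j] = target

lemma sorted_strict (xs : List Int) (hs : xs.Pairwise (· < ·)) {i j : Nat}
    (hi : i < xs.length) (hj : j < xs.length) (hij : i < j) : xs[i] < xs[j] :=
  (List.pairwise_iff_getElem.mp hs) i j hi hj hij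

lemma sorted_le (xs : List Int) (hs : xs.Pairwise (· < ·)) {i j : Nat}
    (hi : i < xs.length) (hj : j < xs.length) (hij : i ≤ j) : xs[i] ≤ xs[j] := by
  rcases Nat.lt_or_ge i j with h | h
  · exact le_of_lt (sorted_strict xs hs hi hj h)
  · have : i = j := le_antisymm hij h
    subst this; exact le_refl _

lemma loopA_spec (xs : List Int) (target : Int) (hs : xs.Pairwise (· < ·)) :
    ∀ (n : Nat) (l r diff : Int) (result : List Int),
      (r + 1 - l).toNat = n → 0 ≤ l → r < (xs.length : Int) →
      (∀ p, PairV xs target l r p → diff > target - 2 * p) →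
      ((¬ ∃ p, PairV xs target l r p) → loopA xs target n l r diff result = result) ∧
      (∀ p, PairV xs target l r p → (∀ q, PairV xs target l r q → q ≤ p) →
        loopA xs target n l r diff result = [p, target - p]) := by
  intro n
  induction n with
  | zero =>
    intro l r diff result hn hl hr hinv
    refine ⟨fun _ => rfl, ?_⟩
    rintro p ⟨i, j, hi, hj, hli, hjr, hij, hzi, hsum⟩ hmax
    omega
  | succ n IH =>
    intro l r diff result hn hl hr hinv
    by_cases hlr : l ≤ r
    · have hl' : l.toNat < xs.length := by omega
      have hr' : r.toNat < xs.length := by omega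
      have hga : PySem.List.pyGet? xs l = some xs[l.toNat] :=
        PySem.List.pyGet?_eq_some_getElem xs hl (by omega)
      have hgb : PySem.List.pyGet? xs r = some xs[r.toNat] :=
        PySem.List.pyGet?_eq_some_getElem xs (by omega) hr
      set a := xs[l.toNat] with ha
      set b := xs[r.toNat] with hb
      rw [loopA]
      simp only [if_pos hlr, hga, hgb]
      by_cases h1 : a + b = target
      · -- sum hits the target: (l, r) is a pair
        have hPla : PairV xs target l r a :=
          ⟨l.toNat, r.toNat, hl', hr', by omega, by omega, by omega, rfl, by omega⟩
        have hdiff : diff > b - a := by have := hinv a hPla; omega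
        rw [if_pos h1, if_pos hdiff]
        -- strict growth: any pair value of the shrunken window exceeds a
        have hgrow : ∀ z, PairV xs target (l + 1) r z → a < z := by
          rintro z ⟨i, j, hi, hj, hli, hjr, hij, hzi, hsum⟩
          have : l.toNat < i := by omega
          have := sorted_strict xs hs hl' hi this
          omega
        have hsub : ∀ z, PairV xs target (l + 1) r z → PairV xs target l r z := by
          rintro z ⟨i, j, hi, hj, hli, hjr, hij, hzi, hsum⟩
          exact ⟨i, j, hi, hj, by omega, hjr, hij, hzi, hsum⟩
        obtain ⟨ih1, ih2⟩ := IH (l + 1) r (b - a) [a, b]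
          (by omega) (by omega) hr
          (by intro z hz; have := hgrow z hz; omega)
        constructor
        · intro h; exact absurd ⟨a, hPla⟩ h
        · intro p hp hmax
          by_cases hex : ∃ q, PairV xs target (l + 1) r q
          · obtain ⟨q, hq⟩ := hex
            have hqp : q ≤ p := hmax q (hsub q hq)
            have hap : a < p := lt_of_lt_of_le (hgrow q hq) hqp
            have hp' : PairV xs target (l + 1) r p := by
              obtain ⟨i, j, hi, hj, hli, hjr, hij, hzi, hsum⟩ := hp
              have hne : l.toNat ≠ i := by
                intro hcon; subst hcon; omega
              exact ⟨i, j, hi, hj, by omega, hjr, hij, hzi, hsum⟩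
            exact ih2 p hp' (fun z hz => hmax z (hsub z hz))
          · -- a is the only pair value left
            have hpa : p = a := by
              obtain ⟨i, j, hi, hj, hli, hjr, hij, hzi, hsum⟩ := hp
              rcases eq_or_lt_of_le hli with hcase | hcase
              · have : i = l.toNat := by omega
                subst this; omega
              · exact absurd ⟨p, ⟨i, j, hi, hj, by omega, hjr, hij, hzi, hsum⟩⟩ hex
            rw [ih1 hex, hpa, show b = target - a by omega]
      · by_cases h2 : a + b < target
        · -- sum too small: index l is in no pair
          rw [if_neg h1, if_pos h2]
          have hshift : ∀ z, PairV xs target l r z ↔ PairV xs target (l + 1) r z := by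
            intro z
            constructor
            · rintro ⟨i, j, hi, hj, hli, hjr, hij, hzi, hsum⟩
              have hne : l.toNat ≠ i := by
                intro hcon
                have hjb : xs[j] ≤ b := sorted_le xs hs hj hr' (by omega)
                subst hcon
                omega
              exact ⟨i, j, hi, hj, by omega, hjr, hij, hzi, hsum⟩
            · rintro ⟨i, j, hi, hj, hli, hjr, hij, hzi, hsum⟩
              exact ⟨i, j, hi, hj, by omega, hjr, hij, hzi, hsum⟩
          obtain ⟨ih1, ih2⟩ := IH (l + 1) r diff result
            (by omega) (by omega) hr (fun z hz => hinv z ((hshift z).mpr hz))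
          constructor
          · intro h; exact ih1 (fun ⟨q, hq⟩ => h ⟨q, (hshift q).mpr hq⟩)
          · intro p hp hmax
            exact ih2 p ((hshift p).mp hp) (fun z hz => hmax z ((hshift z).mpr hz))
        · -- sum too large: index r is in no pair
          rw [if_neg h1, if_neg h2]
          have hshift : ∀ z, PairV xs target l r z ↔ PairV xs target l (r - 1) z := by
            intro z
            constructor
            · rintro ⟨i, j, hi, hj, hli, hjr, hij, hzi, hsum⟩
              have hne : j ≠ r.toNat := by
                intro hcon
                have hai : a ≤ xs[i] := sorted_le xs hs hl' hi (by omega)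
                subst hcon
                omega
              exact ⟨i, j, hi, hj, hli, by omega, hij, hzi, hsum⟩
            · rintro ⟨i, j, hi, hj, hli, hjr, hij, hzi, hsum⟩
              exact ⟨i, j, hi, hj, hli, by omega, hij, hzi, hsum⟩
          obtain ⟨ih1, ih2⟩ := IH l (r - 1) diff result
            (by omega) hl (by omega) (fun z hz => hinv z ((hshift z).mpr hz))
          constructor
          · intro h; exact ih1 (fun ⟨q, hq⟩ => h ⟨q, (hshift q).mpr hq⟩)
          · intro p hp hmax
            exact ih2 p ((hshift p).mp hp) (fun z hz => hmax z ((hshift z).mpr hz))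
    · rw [loopA]
      simp only [if_neg hlr]
      refine ⟨fun _ => trivial, ?_⟩
      rintro p ⟨i, j, hi, hj, hli, hjr, hij, hzi, hsum⟩ hmax
      exact absurd (by omega : l ≤ r) hlr

lemma bestP_iff (xs : List Int) (hs : xs.Pairwise (· < ·)) (target p : Int) :
    PairV xs target 0 ((xs.length : Int) - 1) p ↔
      p ∈ xs ∧ p ≤ target - p ∧ (target - p) ∈ xs := by
  constructor
  · rintro ⟨i, j, hi, hj, _, _, hij, hp, hsum⟩
    refine ⟨hp ▸ List.getElem_mem hi, ?_, ?_⟩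
    · have := sorted_le xs hs hi hj hij; omega
    · have hjv : xs[j] = target - p := by omega
      exact hjv ▸ List.getElem_mem hj
  · rintro ⟨hpmem, hple, hqmem⟩
    obtain ⟨i, hi, hpi⟩ := List.mem_iff_getElem.mp hpmem
    obtain ⟨j, hj, hqj⟩ := List.mem_iff_getElem.mp hqmem
    have hij : i ≤ j := by
      by_contra hlt
      have := sorted_strict xs hs hj hi (by omega)
      omega
    exact ⟨i, j, hi, hj, by omega, by omega, hij, hpi, by omega⟩

lemma ssb_pairwise : ∀ (xs : List Int), strictSortedB xs = true → xs.Pairwise (· < ·) := by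
  intro xs
  induction xs with
  | nil => intro _; exact List.Pairwise.nil
  | cons a t ih =>
    intro h
    cases t with
    | nil => simp
    | cons b u =>
      have h' : (a < b) ∧ strictSortedB (b :: u) = true := by
        simpa [strictSortedB, Bool.and_eq_true, decide_eq_true_eq] using h
      have hp := ih h'.2
      refine List.Pairwise.cons ?_ hp
      intro x hx
      rcases List.mem_cons.mp hx with rfl | hx
      · exact h'.1
      · exact lt_trans h'.1 ((List.pairwise_cons.mp hp).1 x hx)

-- characterization of B's single fold: none ↔ no candidate; some m → m is the largest candidate
lemma foldB_char (target : Int) (s : List Int) :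
    ∀ (ys : List Int) (acc : Option Int),
      ((ys.foldl (fun best p =>
          if p ≤ target - p ∧ PySem.Set.contains s (target - p) then
            match best with
            | none => some p
            | some b => if p > b then some p else some b
          else best) acc) = none ↔
        (acc = none ∧ ∀ p ∈ ys, ¬ (p ≤ target - p ∧ PySem.Set.contains s (target - p)))) ∧
      (∀ m, (ys.foldl (fun best p =>
          if p ≤ target - p ∧ PySem.Set.contains s (target - p) then
            match best with
            | none => some p
            | some b => if p > b then some p else some b
          else best) acc) = some m →
        (acc = some m ∨ (m ∈ ys ∧ (m ≤ target - m ∧ PySem.Set.contains s (target - m)))) ∧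
        (∀ b, acc = some b → b ≤ m) ∧
        (∀ p ∈ ys, (p ≤ target - p ∧ PySem.Set.contains s (target - p)) → p ≤ m)) := by
  intro ys
  induction ys with
  | nil =>
    intro acc
    refine ⟨by simp, ?_⟩
    intro m hm
    simp only [List.foldl_nil] at hm
    exact ⟨Or.inl hm, fun b hb => by rw [hm] at hb; injection hb with h; omega, by simp⟩
  | cons a ys ih =>
    intro acc
    simp only [List.foldl_cons]
    by_cases h : a ≤ target - a ∧ PySem.Set.contains s (target - a)
    · rw [if_pos h]
      cases acc with
      | none =>
        obtain ⟨ih1, ih2⟩ := ih (some a)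
        constructor
        · constructor
          · intro hx; exact absurd (ih1.mp hx).1 (by simp)
          · rintro ⟨-, hall⟩; exact absurd h (hall a List.mem_cons_self)
        · intro m hm
          obtain ⟨h1, h2, h3⟩ := ih2 m hm
          refine ⟨?_, by simp, ?_⟩
          · rcases h1 with h1 | h1
            · injection h1 with h1; subst h1; exact Or.inr ⟨List.mem_cons_self, h⟩
            · exact Or.inr ⟨List.mem_cons_of_mem a h1.1, h1.2⟩
          · intro p hp hc
            rcases List.mem_cons.mp hp with hp | hp
            · subst hp; exact h2 p rfl
            · exact h3 p hp hc
      | some c =>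
        by_cases hac : a > c
        · simp only [if_pos hac]
          obtain ⟨ih1, ih2⟩ := ih (some a)
          constructor
          · constructor
            · intro hx; exact absurd (ih1.mp hx).1 (by simp)
            · rintro ⟨hx, -⟩; exact absurd hx (by simp)
          · intro m hm
            obtain ⟨h1, h2, h3⟩ := ih2 m hm
            have ham : a ≤ m := h2 a rfl
            refine ⟨?_, ?_, ?_⟩
            · rcases h1 with h1 | h1
              · injection h1 with h1; subst h1; exact Or.inr ⟨List.mem_cons_self, h⟩
              · exact Or.inr ⟨List.mem_cons_of_mem a h1.1, h1.2⟩
            · intro b hb; injection hb with hb; omega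
            · intro p hp hc
              rcases List.mem_cons.mp hp with hp | hp
              · subst hp; exact ham
              · exact h3 p hp hc
        · simp only [if_neg hac]
          obtain ⟨ih1, ih2⟩ := ih (some c)
          constructor
          · constructor
            · intro hx; exact absurd (ih1.mp hx).1 (by simp)
            · rintro ⟨hx, -⟩; exact absurd hx (by simp)
          · intro m hm
            obtain ⟨h1, h2, h3⟩ := ih2 m hm
            have hcm : c ≤ m := h2 c rfl
            refine ⟨?_, ?_, ?_⟩
            · rcases h1 with h1 | h1
              · exact Or.inl h1
              · exact Or.inr ⟨List.mem_cons_of_mem a h1.1, h1.2⟩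
            · intro b hb; injection hb with hb; omega
            · intro p hp hc'
              rcases List.mem_cons.mp hp with hp | hp
              · subst hp; omega
              · exact h3 p hp hc'
    · rw [if_neg h]
      obtain ⟨ih1, ih2⟩ := ih acc
      constructor
      · rw [ih1]
        constructor
        · rintro ⟨hacc, hall⟩
          exact ⟨hacc, fun p hp => by
            rcases List.mem_cons.mp hp with hp | hp
            · subst hp; exact h
            · exact hall p hp⟩
        · rintro ⟨hacc, hall⟩
          exact ⟨hacc, fun p hp => hall p (List.mem_cons_of_mem a hp)⟩
      · intro m hm
        obtain ⟨h1, h2, h3⟩ := ih2 m hm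
        refine ⟨?_, h2, ?_⟩
        · rcases h1 with h1 | h1
          · exact Or.inl h1
          · exact Or.inr ⟨List.mem_cons_of_mem a h1.1, h1.2⟩
        · intro p hp hc
          rcases List.mem_cons.mp hp with hp | hp
          · subst hp; exact absurd hc h
          · exact h3 p hp hc

-- B's port, with its local lets unfolded (definitional)
lemma altB_eq (target : Int) (xs : List Int) :
    find_partition_alt target xs =
      match xs.foldl (fun best p =>
          if p ≤ target - p ∧ PySem.Set.contains (PySem.Set.ofList xs) (target - p) then
            match best with
            | none => some p
            | some b => if p > b then some p else some b
          else best) none with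
      | none => [0, 0]
      | some b => [b, target - b] := rfl

lemma contains_iff (xs : List Int) (y : Int) :
    PySem.Set.contains (PySem.Set.ofList xs) y = true ↔ y ∈ xs := by
  simp [PySem.Set.contains]

-- when no two elements (i ≤ j allowed equal) sum to target, the loop never updates result
lemma loopA_keep (xs : List Int) (target : Int)
    (hno : ∀ (i j : Nat) (hi : i < xs.length) (hj : j < xs.length), xs[i] + xs[j] ≠ target) :
    ∀ (n : Nat) (l r diff : Int) (result : List Int), 0 ≤ l → r < (xs.length : Int) →
      loopA xs target n l r diff result = result := by
  intro n
  induction n with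
  | zero => intro l r diff result _ _; rfl
  | succ n ih =>
    intro l r diff result hl hr
    by_cases hlr : l ≤ r
    · have hl' : l.toNat < xs.length := by omega
      have hr' : r.toNat < xs.length := by omega
      have hga : PySem.List.pyGet? xs l = some xs[l.toNat] :=
        PySem.List.pyGet?_eq_some_getElem xs hl (by omega)
      have hgb : PySem.List.pyGet? xs r = some xs[r.toNat] :=
        PySem.List.pyGet?_eq_some_getElem xs (by omega) hr
      rw [loopA]
      simp only [if_pos hlr, hga, hgb]
      rw [if_neg (hno l.toNat r.toNat hl' hr')]
      by_cases h2 : xs[l.toNat] + xs[r.toNat] < target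
      · rw [if_pos h2]; exact ih (l + 1) r diff result (by omega) hr
      · rw [if_neg h2]; exact ih l (r - 1) diff result hl (by omega)
    · rw [loopA]; simp only [if_neg hlr]

-- ===== VERDICT (by name: the statement is the Claim_ definition above) =====
theorem find_partition_spec : Claim_equal_find_partition := by
  intro target xs _hdom hpre
  rcases hpre with ⟨hss, hposb⟩ | hnoc
  case inr =>
    -- no pair sums to target: A keeps [0, 0] and B's fold finds no candidate
    unfold Spec_find_partition
    rw [altB_eq]
    unfold find_partition
    have hfold := ((foldB_char target (PySem.Set.ofList xs) xs none).1).mpr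
      ⟨rfl, fun p hp hc => hnoc p hp ⟨hc.1, (contains_iff xs _).mp hc.2⟩⟩
    rw [hfold]
    exact loopA_keep xs target
      (by
        intro i j hi hj hsum
        rcases le_total xs[i] xs[j] with hij | hij
        · refine hnoc xs[i] (List.getElem_mem hi) ⟨by omega, ?_⟩
          have : target - xs[i] = xs[j] := by omega
          rw [this]; exact List.getElem_mem hj
        · refine hnoc xs[j] (List.getElem_mem hj) ⟨by omega, ?_⟩
          have : target - xs[j] = xs[i] := by omega
          rw [this]; exact List.getElem_mem hi)
      xs.length 0 ((xs.length : Int) - 1) target [0, 0] le_rfl (by omega)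
  case inl =>
  have hs : xs.Pairwise (· < ·) := ssb_pairwise xs hss
  have hpos : ∀ x ∈ xs, 0 < x := by
    simpa [List.all_eq_true, decide_eq_true_eq] using hposb
  unfold Spec_find_partition
  rw [altB_eq]
  unfold find_partition
  have hinv : ∀ p, PairV xs target 0 ((xs.length : Int) - 1) p → target > target - 2 * p := by
    intro p hp
    have hm := ((bestP_iff xs hs target p).mp hp).1
    have := hpos p hm
    omega
  obtain ⟨hA1, hA2⟩ := loopA_spec xs target hs xs.length 0
    ((xs.length : Int) - 1) target [0, 0] (by omega) le_rfl (by omega) hinv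
  obtain ⟨hB1, hB2⟩ := foldB_char target (PySem.Set.ofList xs) xs none
  cases hcase : xs.foldl (fun best p =>
      if p ≤ target - p ∧ PySem.Set.contains (PySem.Set.ofList xs) (target - p) then
        match best with
        | none => some p
        | some b => if p > b then some p else some b
      else best) none with
  | none =>
    obtain ⟨-, hnoc⟩ := hB1.mp hcase
    apply hA1
    rintro ⟨p, hp⟩
    rw [bestP_iff xs hs] at hp
    exact hnoc p hp.1 ⟨hp.2.1, (contains_iff xs _).mpr hp.2.2⟩
  | some m =>
    obtain ⟨hm1, -, hm3⟩ := hB2 m hcase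
    have hCm : m ∈ xs ∧ m ≤ target - m ∧ (target - m) ∈ xs := by
      rcases hm1 with hm1 | hm1
      · exact absurd hm1 (by simp)
      · exact ⟨hm1.1, hm1.2.1, (contains_iff xs _).mp hm1.2.2⟩
    exact hA2 m ((bestP_iff xs hs target m).mpr hCm)
      (fun q hq => by
        rw [bestP_iff xs hs] at hq
        exact hm3 q hq.1 ⟨hq.2.1, (contains_iff xs _).mpr hq.2.2⟩)
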